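-- pv_equiv track=rewrite | github.com/SkyPy777/Birthday_Paradox | Birthday_paradox.py | count_shared_birthdays
-- ===== SOURCE A (Python) =====
-- def count_shared_birthdays(birthday_list):
--
--     birthday_counts = {}
--
--     for birthday in birthday_list:
--         if birthday in birthday_counts:
--             birthday_counts[birthday] += 1
--         else:
--             birthday_counts[birthday] = 1
--
--     shared_birthdays = {}
--     for birthday, count in birthday_counts.items():
--         if count > 1:
--             shared_birthdays[birthday] = count
--     return shared_birthdays
-- ===== SOURCE B (Python) =====
-- def count_shared_birthdays(birthday_list):
--     # Partition loop: no counts dict at all.  Repeatedly take the first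
--     # remaining birthday, strip every occurrence of it, read its count off
--     # the length drop, and keep it if it occurred more than once.
--     shared = {}
--     work = list(birthday_list)
--     while work:
--         first = work[0]
--         rest = [b for b in work[1:] if b != first]
--         c = len(work) - len(rest)
--         if c > 1:
--             shared[first] = c
--         work = rest
--     return shared
-- ===== Notes on version B (the rewrite author's own statement) =====
-- stated objective: alternative
-- what changed: A builds a running counts dict over the list and then filters its items in a second pass; B keeps no counts dict at all: it repeatedly partitions the remaining list, stripping every occurrence of the current head, reading that head's count off the length drop, and looping on the remainder.
import Mathlib
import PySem

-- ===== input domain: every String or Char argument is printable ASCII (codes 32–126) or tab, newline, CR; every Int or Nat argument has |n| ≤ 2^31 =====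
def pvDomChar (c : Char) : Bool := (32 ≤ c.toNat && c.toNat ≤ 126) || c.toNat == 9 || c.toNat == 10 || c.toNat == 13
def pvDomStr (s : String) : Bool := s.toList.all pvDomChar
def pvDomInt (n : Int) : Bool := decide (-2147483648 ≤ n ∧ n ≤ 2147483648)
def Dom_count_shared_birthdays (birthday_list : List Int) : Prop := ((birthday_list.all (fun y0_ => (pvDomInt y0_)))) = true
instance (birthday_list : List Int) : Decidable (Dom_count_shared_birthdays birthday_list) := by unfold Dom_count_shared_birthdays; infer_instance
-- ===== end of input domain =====

-- B replaces A's count-then-filter dict passes by a recursive partition (strip the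
-- head's occurrences, count = length drop, recurse): alternative decomposition, not faster.

-- ===== PORT A =====
def count_shared_birthdays (birthday_list : List Int) : List (Int × Int) :=
  let birthday_counts : PySem.Dict Int Int :=
    birthday_list.foldl
      (fun d birthday =>
        if d.contains birthday then d.insert birthday (d.getD birthday 0 + 1)
        else d.insert birthday 1)
      PySem.Dict.empty
  let shared_birthdays : PySem.Dict Int Int :=
    birthday_counts.items.foldl
      (fun sh p => if 1 < p.2 then sh.insert p.1 p.2 else sh)
      PySem.Dict.empty
  shared_birthdays.items

-- ===== PORT B =====
-- The while loop over the shrinking work list, ported as recursion on work;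
-- 'shared[first] = c' adds a fresh key (first is stripped from rest), so it appends.
def csbLoop : List Int → List (Int × Int) → List (Int × Int)
  | [], shared => shared
  | first :: tl, shared =>
    let rest := tl.filter (fun b => b != first)
    let c : Int := ((first :: tl).length : Int) - (rest.length : Int)
    csbLoop rest (if 1 < c then shared ++ [(first, c)] else shared)
termination_by work => work.length
decreasing_by
  simpa using Nat.lt_succ_of_le (List.length_filter_le _ _)

def count_shared_birthdays_alt (birthday_list : List Int) : List (Int × Int) :=
  csbLoop birthday_list []

-- ===== PRECONDITION & SPEC =====
def Spec_count_shared_birthdays (birthday_list : List Int) (out : List (Int × Int)) : Prop := out = count_shared_birthdays_alt birthday_list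
instance (birthday_list : List Int) (out : List (Int × Int)) : Decidable (Spec_count_shared_birthdays birthday_list out) := by unfold Spec_count_shared_birthdays; infer_instance

-- ===== CLAIM (what is proved, stated in full; the proofs are below) =====
def Claim_equal_count_shared_birthdays : Prop := ∀ (birthday_list : List Int), Dom_count_shared_birthdays birthday_list → Spec_count_shared_birthdays birthday_list (count_shared_birthdays birthday_list)

-- ===== LEMMAS AND PROOFS =====

-- The common description of both outputs: the duplicated values in first-occurrence
-- order, each with its total count.
def sharedOf (bl : List Int) : List (Int × Int) :=
  (PySem.Set.ofList bl).filterMap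
    (fun k => if 1 < (bl.count k : Int) then some (k, (bl.count k : Int)) else none)

-- A's counting loop step equals the standard counter step: when the key is absent its default count is 0.
theorem countStep_eq :
    (fun (d : PySem.Dict Int Int) birthday =>
        if d.contains birthday then d.insert birthday (d.getD birthday 0 + 1)
        else d.insert birthday 1)
      = fun d birthday => d.insert birthday (d.getD birthday 0 + 1) := by
  funext d b
  by_cases h : d.contains b = true
  · simp [h]
  · simp only [Bool.not_eq_true] at h
    rw [PySem.Dict.getD_of_not_contains d 0 h]
    simp [h]

-- A's filtering loop over nodup keys fresh for d builds exactly the filterMap, appended.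
theorem filterLoop_items (c : Int → Int) :
    ∀ (l : List Int) (d : PySem.Dict Int Int), l.Nodup →
      (∀ k ∈ l, d.contains k = false) →
      (l.foldl (fun sh k => if 1 < c k then sh.insert k (c k) else sh) d).items
        = d.items ++ l.filterMap (fun k => if 1 < c k then some (k, c k) else none) := by
  intro l
  induction l with
  | nil => simp
  | cons k t ih =>
    intro d hnd hfresh
    have hkf : d.contains k = false := hfresh k (by simp)
    have hknt : k ∉ t := (List.nodup_cons.mp hnd).1
    have hnd' : t.Nodup := (List.nodup_cons.mp hnd).2
    by_cases h : 1 < c k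
    · have hfresh' : ∀ j ∈ t, (d.insert k (c k)).contains j = false := by
        intro j hj
        rw [PySem.Dict.contains_insert]
        have hjk : j ≠ k := fun e => hknt (e ▸ hj)
        simp [hjk, hfresh j (by simp [hj])]
      rw [List.foldl_cons, if_pos h, ih _ hnd' hfresh',
        PySem.Dict.items_insert_of_not_contains d (c k) hkf]
      simp [h]
    · rw [List.foldl_cons, if_neg h, ih _ hnd' (fun j hj => hfresh j (by simp [hj]))]
      simp [h]

theorem A_eq_sharedOf (bl : List Int) : count_shared_birthdays bl = sharedOf bl := by
  unfold count_shared_birthdays sharedOf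
  rw [countStep_eq, PySem.Dict.foldl_insert_getD_add_one_eq_counter]
  simp only [PySem.Dict.items_counter, List.foldl_map]
  have := filterLoop_items (fun k => (bl.count k : Int)) (PySem.Set.ofList bl)
    PySem.Dict.empty (PySem.Set.nodup_ofList bl) (by simp)
  simpa using this

-- Updating past a value the set already holds is the same as updating past its removal.
theorem update_filter_of_contains (x : Int) :
    ∀ (xs : List Int) (s : PySem.Set Int), x ∈ s →
      PySem.Set.update s xs = PySem.Set.update s (xs.filter (fun b => b != x)) := by
  intro xs
  induction xs with
  | nil => simp
  | cons y t ih =>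
    intro s hs
    by_cases hy : y = x
    · subst hy
      have ha : PySem.Set.add s y = s := by simp [PySem.Set.add, PySem.Set.contains, hs]
      have h1 : PySem.Set.update s (y :: t) = PySem.Set.update (PySem.Set.add s y) t := rfl
      rw [h1, ha, List.filter_cons]
      simpa using ih s hs
    · rw [List.filter_cons, if_pos (by simp [hy])]
      show PySem.Set.update (PySem.Set.add s y) t
          = PySem.Set.update (PySem.Set.add s y) (t.filter (fun b => b != x))
      exact ih _ ((PySem.Set.mem_add s y x).mpr (Or.inl hs))

-- Prepending an element absent from l commutes with the whole update.
theorem update_cons_notmem (x : Int) :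
    ∀ (l : List Int) (s : PySem.Set Int), x ∉ l →
      PySem.Set.update (x :: s) l = x :: PySem.Set.update s l := by
  intro l
  induction l with
  | nil => intro s _; rfl
  | cons y t ih =>
    intro s hx
    have hyx : y ≠ x := fun e => hx (by simp [e])
    have ha : PySem.Set.add (x :: s) y = x :: PySem.Set.add s y := by
      by_cases hc : y ∈ s
      · simp [PySem.Set.add, PySem.Set.contains, hyx, hc]
      · simp [PySem.Set.add, PySem.Set.contains, hyx, hc]
    show PySem.Set.update (PySem.Set.add (x :: s) y) t
        = x :: PySem.Set.update (PySem.Set.add s y) t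
    rw [ha]
    exact ih _ (fun h => hx (by simp [h]))

-- First-occurrence dedup of x :: xs is x followed by the dedup of xs stripped of x.
theorem ofList_cons_filter (x : Int) (xs : List Int) :
    PySem.Set.ofList (x :: xs) = x :: PySem.Set.ofList (xs.filter (fun b => b != x)) := by
  have h1 : PySem.Set.ofList (x :: xs) = PySem.Set.update ([x] : PySem.Set Int) xs := rfl
  rw [h1, update_filter_of_contains x xs [x] (by simp)]
  have hx : x ∉ xs.filter (fun b => b != x) := by simp
  exact update_cons_notmem x _ ([] : PySem.Set Int) hx

-- Removing every occurrence of x drops exactly count x from the length.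
theorem length_filter_add_count (l : List Int) (x : Int) :
    (l.filter (fun b => b != x)).length + l.count x = l.length := by
  induction l with
  | nil => simp
  | cons y t ih =>
    by_cases h : y = x <;> simp [h] <;> omega

theorem csbLoop_eq (bl : List Int) :
    ∀ shared, csbLoop bl shared = shared ++ sharedOf bl := by
  generalize hn : bl.length = n
  induction n using Nat.strong_induction_on generalizing bl with
  | _ n ih =>
  match bl, hn with
  | [], _ => intro shared; simp [csbLoop, sharedOf]
  | first :: tl, hn =>
    intro shared
    have hlt : (tl.filter (fun b => b != first)).length < n := by
      subst hn; simpa using Nat.lt_succ_of_le (List.length_filter_le _ _)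
    have ihr := ih _ hlt (tl.filter (fun b => b != first)) rfl
    rw [csbLoop]
    show csbLoop (tl.filter (fun b => b != first))
          (if 1 < ((first :: tl).length : Int) - ((tl.filter (fun b => b != first)).length : Int)
            then shared ++ [(first, ((first :: tl).length : Int) - ((tl.filter (fun b => b != first)).length : Int))]
            else shared)
        = shared ++ sharedOf (first :: tl)
    set rest := tl.filter (fun b => b != first) with hrest
    set c : Int := ((first :: tl).length : Int) - (rest.length : Int) with hc
    have hcount : c = (((first :: tl).count first : Nat) : Int) := by
      have := length_filter_add_count tl first
      rw [hc, hrest]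
      simp only [List.length_cons, List.count_cons_self]
      push_cast
      omega
    have hshared : sharedOf (first :: tl)
        = (if 1 < c then [(first, c)] else []) ++ sharedOf rest := by
      unfold sharedOf
      rw [ofList_cons_filter first tl, List.filterMap_cons]
      have hrestc : ∀ k ∈ PySem.Set.ofList rest,
          ((first :: tl).count k : Int) = ((rest.count k : Nat) : Int) := by
        intro k hk
        have hk' : k ∈ rest := (PySem.Set.mem_ofList rest k).mp hk
        have hkf : k ≠ first := by simpa using (List.of_mem_filter hk')
        have h1 : rest.count k = tl.count k := by
          rw [hrest]; exact List.count_filter (by simp [hkf])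
        simp [Ne.symm hkf, h1]
      rw [List.filterMap_congr (fun k hk => by rw [hrestc k hk])]
      rw [show (((first :: tl).count first : Nat) : Int) = c from hcount.symm]
      by_cases h : 1 < c
      · simp [h]; rw [← hrest]
      · simp [h]; rw [← hrest]
    rw [ihr, hshared]
    by_cases h : 1 < c
    · simp [h]
    · simp [h]

theorem B_eq_sharedOf (bl : List Int) : count_shared_birthdays_alt bl = sharedOf bl := by
  unfold count_shared_birthdays_alt
  simpa using csbLoop_eq bl []

-- ===== VERDICT (by name: the statement is the Claim_ definition above) =====
theorem count_shared_birthdays_spec : Claim_equal_count_shared_birthdays := by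
  intro bl _
  unfold Spec_count_shared_birthdays
  rw [A_eq_sharedOf, B_eq_sharedOf]
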